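-- pv_equiv track=rewrite | github.com/rtrydev/jla-recommendation-ai | src/utils/enhancers/text_enhancer.py | enhance_neighborhood
-- ===== SOURCE A (Python) =====
-- from typing import List
--
-- def enhance_neighborhood(lines: List[List[str]], neighborhood_size: int) -> List[List[str]]:
--     result = []
--     for idx in range(neighborhood_size, len(lines) - neighborhood_size):
--         current_enhanced_line = []
--         for neighbor_idx in range(idx - neighborhood_size, idx + neighborhood_size):
--             current_enhanced_line += lines[neighbor_idx]
--
--         result.append(current_enhanced_line)
--
--     return result
-- ===== SOURCE B (Python) =====
-- from typing import List
--
-- def enhance_neighborhood(lines: List[List[str]], neighborhood_size: int) -> List[List[str]]: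
--     # Sliding window: build the first window once, then maintain it incrementally
--     # (append the entering line's tokens, drop the leaving line's tokens).
--     n = len(lines)
--     k = neighborhood_size
--     window = []
--     for line in lines[:2 * k]:
--         window.extend(line)
--     result = []
--     for idx in range(k, n - k):
--         result.append(window.copy())
--         window.extend(lines[idx + k])
--         del window[:len(lines[idx - k])]
--     return result
-- ===== Notes on version B (the rewrite author's own statement) =====
-- stated objective: alternative
-- what changed: B replaces A's per-index re-concatenation of the 2k neighboring lines with a single sliding-window pass that builds the first window once and then maintains it incrementally (append the entering line's tokens, drop the leaving line's tokens), snapshotting the window at each center index.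
-- outside the precondition, e.g. on enhance_neighborhood([['a']], -1): A returns [[], [], []], B raises IndexError
import Mathlib
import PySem

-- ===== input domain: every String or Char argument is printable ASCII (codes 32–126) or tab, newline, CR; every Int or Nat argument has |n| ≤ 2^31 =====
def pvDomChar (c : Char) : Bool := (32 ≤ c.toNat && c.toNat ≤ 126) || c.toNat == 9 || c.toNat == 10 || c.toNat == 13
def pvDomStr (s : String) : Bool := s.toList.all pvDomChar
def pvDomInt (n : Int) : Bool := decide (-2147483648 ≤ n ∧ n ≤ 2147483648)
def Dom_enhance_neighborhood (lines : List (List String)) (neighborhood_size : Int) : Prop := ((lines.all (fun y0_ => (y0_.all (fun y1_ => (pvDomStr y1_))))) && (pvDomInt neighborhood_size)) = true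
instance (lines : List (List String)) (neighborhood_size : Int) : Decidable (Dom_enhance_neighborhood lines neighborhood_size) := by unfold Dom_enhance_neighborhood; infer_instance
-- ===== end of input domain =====

-- B replaces A's per-index re-concatenation of the 2k neighboring lines by one sliding
-- pass that maintains the current window incrementally (objective: alternative algorithm).

-- ===== PORT A =====
def enhance_neighborhood (lines : List (List String)) (neighborhood_size : Int) : List (List String) :=
  (PySem.List.pyRange neighborhood_size ((lines.length : Int) - neighborhood_size) 1).foldl
    (fun result idx =>
      result ++ [ (PySem.List.pyRange (idx - neighborhood_size) (idx + neighborhood_size) 1).foldl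
          (fun cur ni => cur ++ PySem.List.pyGetD lines ni []) [] ])
    []

-- ===== PORT B =====
def enhance_neighborhood_alt (lines : List (List String)) (neighborhood_size : Int) : List (List String) :=
  let n : Int := lines.length
  let window := (PySem.List.slice lines (some 0) (some (2 * neighborhood_size))).foldl
      (fun w line => w ++ line) []
  ((PySem.List.pyRange neighborhood_size (n - neighborhood_size) 1).foldl
    (fun (st : List String × List (List String)) idx =>
      ((st.1 ++ PySem.List.pyGetD lines (idx + neighborhood_size) []).drop
          (PySem.List.pyGetD lines (idx - neighborhood_size) []).length,
       st.2 ++ [st.1]))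
    (window, [])).2

-- ===== PRECONDITION & SPEC =====
-- Pre_ restricts to the natural domain of nonnegative neighborhood sizes: for negative
-- sizes A's value (a list of n+2|k| empty windows) is an accident of empty inner ranges,
-- and B's sliding pass raises an IndexError (or uses wrapped negative indices) there.
def Pre_enhance_neighborhood (lines : List (List String)) (neighborhood_size : Int) : Prop :=
  0 ≤ neighborhood_size
instance (lines : List (List String)) (neighborhood_size : Int) : Decidable (Pre_enhance_neighborhood lines neighborhood_size) := by unfold Pre_enhance_neighborhood; infer_instance

def pvWitness_enhance_neighborhood : List (List String) × Int := ([["a", "b"], ["c"], ["d"]], 1)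

def Spec_enhance_neighborhood (lines : List (List String)) (neighborhood_size : Int) (out : List (List String)) : Prop := out = enhance_neighborhood_alt lines neighborhood_size
instance (lines : List (List String)) (neighborhood_size : Int) (out : List (List String)) : Decidable (Spec_enhance_neighborhood lines neighborhood_size out) := by unfold Spec_enhance_neighborhood; infer_instance

-- ===== CLAIM (what is proved, stated in full; the proofs are below) =====
def Claim_equal_enhance_neighborhood : Prop := ∀ (lines : List (List String)) (neighborhood_size : Int), Dom_enhance_neighborhood lines neighborhood_size → Pre_enhance_neighborhood lines neighborhood_size → Spec_enhance_neighborhood lines neighborhood_size (enhance_neighborhood lines neighborhood_size)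

-- ===== LEMMAS AND PROOFS =====

-- the window at center index kn + j: concatenation of lines[j, j+2*kn)
def pvWin (lines : List (List String)) (kn j : Nat) : List String :=
  ((lines.drop j).take (2 * kn)).flatten

theorem pvFlattenTakeSucc (lines : List (List String)) (j m : Nat) (h : j + m < lines.length) :
    ((lines.drop j).take m).flatten ++ lines.getD (j + m) []
      = ((lines.drop j).take (m + 1)).flatten := by
  rw [List.take_add_one, List.getElem?_drop, List.flatten_append]
  rw [List.getD_eq_getElem?_getD, List.getElem?_eq_getElem h]
  simp

theorem pvFlattenTakeHead (lines : List (List String)) (j m : Nat) (h : j < lines.length) :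
    ((lines.drop j).take (m + 1)).flatten
      = lines[j] ++ ((lines.drop (j + 1)).take m).flatten := by
  rw [List.drop_eq_getElem_cons h, List.take_succ_cons, List.flatten_cons]

theorem pvWinStep (lines : List (List String)) (kn j : Nat) (h : 2 * kn + j < lines.length) :
    (pvWin lines kn j ++ lines.getD (j + 2 * kn) []).drop (lines.getD j []).length
      = pvWin lines kn (j + 1) := by
  unfold pvWin
  rw [pvFlattenTakeSucc lines j (2 * kn) (by omega),
      pvFlattenTakeHead lines j (2 * kn) (by omega)]
  rw [List.getD_eq_getElem?_getD, List.getElem?_eq_getElem (by omega : j < lines.length)]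
  simp

-- A's inner loop produces the window
theorem pvInner (lines : List (List String)) :
    ∀ (m j : Nat) (acc : List String), j + m ≤ lines.length →
    List.foldl (fun cur (s : Nat) => cur ++ PySem.List.pyGetD lines ((j : Int) + (s : Int)) []) acc
        (List.range m)
      = acc ++ ((lines.drop j).take m).flatten := by
  intro m
  induction m with
  | zero => intro j acc _; simp
  | succ m ih =>
    intro j acc h
    rw [List.range_succ, List.foldl_append, ih j acc (by omega)]
    simp only [List.foldl_cons, List.foldl_nil]
    have hc : (j : Int) + (m : Int) = ((j + m : Nat) : Int) := by push_cast; ring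
    rw [hc, PySem.List.pyGetD_natCast, List.append_assoc,
        pvFlattenTakeSucc lines j m (by omega)]

-- B's loop invariant
theorem pvBLoop (lines : List (List String)) (kn : Nat) :
    ∀ (m j : Nat) (r : List (List String)),
      j + m = (((lines.length : Int)) - (kn : Int) - (kn : Int)).toNat →
    (List.foldl
        (fun (st : List String × List (List String)) (t : Nat) =>
          ((st.1 ++ PySem.List.pyGetD lines ((kn : Int) + (t : Int) + (kn : Int)) []).drop
              (PySem.List.pyGetD lines ((kn : Int) + (t : Int) - (kn : Int)) []).length,
           st.2 ++ [st.1]))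
        (pvWin lines kn j, r) (List.range' j m)).2
      = r ++ (List.range' j m).map (fun t => pvWin lines kn t) := by
  intro m
  induction m with
  | zero => intro j r _; simp
  | succ m ih =>
    intro j r h
    have hb : 2 * kn + j < lines.length := by omega
    rw [List.range'_succ]
    simp only [List.foldl_cons]
    have h1 : (kn : Int) + (j : Int) + (kn : Int) = ((j + 2 * kn : Nat) : Int) := by
      push_cast; ring
    have h2 : (kn : Int) + (j : Int) - (kn : Int) = ((j : Nat) : Int) := by omega
    rw [h1, h2, PySem.List.pyGetD_natCast, PySem.List.pyGetD_natCast,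
        pvWinStep lines kn j hb, ih (j + 1) (r ++ [pvWin lines kn j]) (by omega)]
    simp [List.map_cons]

theorem pvFoldlAppend {α : Type} (xs : List (List α)) (acc : List α) :
    xs.foldl (fun w line => w ++ line) acc = acc ++ xs.flatten :=
  PySem.List.foldl_append_eq_flatten xs acc

-- ===== VERDICT (by name: the statement is the Claim_ definition above) =====
theorem enhance_neighborhood_spec : Claim_equal_enhance_neighborhood := by
  intro lines k _ hpre
  obtain ⟨kn, rfl⟩ : ∃ m : Nat, k = (m : Int) :=
    ⟨k.toNat, (Int.toNat_of_nonneg hpre).symm⟩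
  unfold Spec_enhance_neighborhood enhance_neighborhood enhance_neighborhood_alt
  simp only []
  rw [PySem.List.pyRange_one, List.foldl_map, List.foldl_map,
      PySem.List.foldl_append_singleton_eq_map]
  set M : Nat := (((lines.length : Int)) - (kn : Int) - (kn : Int)).toNat with hM
  -- B's initial window is the window at j = 0
  have hwin0 : (PySem.List.slice lines (some 0) (some (2 * (kn : Int)))).foldl
      (fun w line => w ++ line) [] = pvWin lines kn 0 := by
    have : (2 * (kn : Int)) = ((2 * kn : Nat) : Int) := by push_cast; ring
    rw [this, PySem.List.slice_zero_start, PySem.List.slice_to_natCast, pvFoldlAppend]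
    simp [pvWin]
  rw [hwin0]
  have hB := pvBLoop lines kn M 0 [] (by omega)
  rw [List.range_eq_range']
  rw [hB]
  -- both sides are maps over range' 0 M; compare pointwise
  simp only [List.nil_append]
  apply List.map_congr_left
  intro t ht
  have htM : t < M := by
    have := List.mem_range'_1.mp ht; omega
  have e1 : (kn : Int) + (t : Int) - (kn : Int) = ((t : Nat) : Int) := by omega
  have e2 : (kn : Int) + (t : Int) + (kn : Int) = ((t : Int)) + ((2 * kn : Nat) : Int) := by
    push_cast; ring
  rw [e1, e2, PySem.List.pyRange_one, List.foldl_map]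
  have e3 : (((t : Int)) + ((2 * kn : Nat) : Int) - (t : Int)).toNat = 2 * kn := by omega
  rw [e3, pvInner lines (2 * kn) t [] (by omega)]
  simp [pvWin]
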